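-- pv_equiv track=rewrite | github.com/DMNDLR/slovak-traffic-sign-holder-ai | article_translator.py | get_czech_cta_links
-- ===== SOURCE A (Python) =====
-- def get_czech_cta_links(software_list, original_href):
--     """Generate appropriate Czech CTA links based on detected software"""
--
--     # Czech website base URLs (adjust these to your actual Czech site structure)
--     czech_links = {
--         'sketchup': {
--             'product': '/sketchup/',
--             'courses': '/kurzy/sketchup-kurz/',
--             'tutorials': '/navody/sketchup/',
--             'licenses': '/sketchup-licence/'
--         },
--         'd5-render': {
--             'product': '/d5-render/',
--             'courses': '/kurzy/d5-render-kurz/',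
--             'tutorials': '/navody/d5-render/',
--             'licenses': '/d5-render-licence/'
--         },
--         'archicad': {
--             'product': '/archicad/',
--             'courses': '/kurzy/archicad-kurz/',
--             'tutorials': '/navody/archicad/',
--             'licenses': '/archicad-licence/'
--         },
--         'revit': {
--             'product': '/revit/',
--             'courses': '/kurzy/revit-kurz/',
--             'tutorials': '/navody/revit/',
--             'licenses': '/revit-licence/'
--         },
--         'rhino': {
--             'product': '/rhino/',
--             'courses': '/kurzy/rhino-kurz/',
--             'tutorials': '/navody/rhino/',
--             'licenses': '/rhino-licence/'
--         },
--         # Add more software as needed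
--         'general': {
--             'product': '/software/',
--             'courses': '/kurzy/',
--             'tutorials': '/navody/',
--             'contact': '/kontakt/',
--             'consultation': '/konzultace/'
--         }
--     }
--
--     # Determine link type based on original href content
--     original_lower = original_href.lower()
--
--     if not software_list:
--         software_list = ['general']
--
--     primary_software = software_list[0]  # Use the first detected software
--
--     # Map Slovak patterns to Czech equivalents
--     if any(word in original_lower for word in ['licenc', 'license', 'predaj', 'shop']):
--         return czech_links.get(primary_software, czech_links['general']).get('licenses', '/software/')
--     elif any(word in original_lower for word in ['kurz', 'skoleni', 'training', 'learn']):
--         return czech_links.get(primary_software, czech_links['general']).get('courses', '/kurzy/')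
--     elif any(word in original_lower for word in ['navod', 'tutorial', 'guide', 'help']):
--         return czech_links.get(primary_software, czech_links['general']).get('tutorials', '/navody/')
--     elif any(word in original_lower for word in ['kontakt', 'contact', 'konzultac']):
--         return czech_links.get(primary_software, czech_links['general']).get('consultation', '/konzultace/')
--     else:
--         # Default to product page
--         return czech_links.get(primary_software, czech_links['general']).get('product', '/software/')
-- ===== SOURCE B (Python) =====
-- # Alternative: one accumulator pass over a flat keyword->priority map computing
-- # the minimal matching priority, then a single index into a fully resolved
-- # software->URL table (no nested dicts, no per-branch .get fallback chain).
-- _KEYWORD_PRIORITY = {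
--     'licenc': 0, 'license': 0, 'predaj': 0, 'shop': 0,
--     'kurz': 1, 'skoleni': 1, 'training': 1, 'learn': 1,
--     'navod': 2, 'tutorial': 2, 'guide': 2, 'help': 2,
--     'kontakt': 3, 'contact': 3, 'konzultac': 3,
-- }
--
-- # URLs per software, fully resolved for every category priority
-- # [0=licenses, 1=courses, 2=tutorials, 3=consultation, 4=product]
-- _URL_TABLE = {
--     'sketchup': ['/sketchup-licence/', '/kurzy/sketchup-kurz/', '/navody/sketchup/', '/konzultace/', '/sketchup/'],
--     'd5-render': ['/d5-render-licence/', '/kurzy/d5-render-kurz/', '/navody/d5-render/', '/konzultace/', '/d5-render/'],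
--     'archicad': ['/archicad-licence/', '/kurzy/archicad-kurz/', '/navody/archicad/', '/konzultace/', '/archicad/'],
--     'revit': ['/revit-licence/', '/kurzy/revit-kurz/', '/navody/revit/', '/konzultace/', '/revit/'],
--     'rhino': ['/rhino-licence/', '/kurzy/rhino-kurz/', '/navody/rhino/', '/konzultace/', '/rhino/'],
--     'general': ['/software/', '/kurzy/', '/navody/', '/konzultace/', '/software/'],
-- }
--
--
-- def get_czech_cta_links(software_list, original_href):
--     """Generate appropriate Czech CTA links based on detected software"""
--     lower = original_href.lower()
--     cat = 4
--     for kw, prio in _KEYWORD_PRIORITY.items():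
--         if kw in lower:
--             cat = min(cat, prio)
--     urls = _URL_TABLE.get(software_list[0] if software_list else 'general',
--                           _URL_TABLE['general'])
--     return urls[cat]
-- ===== Notes on version B (the rewrite author's own statement) =====
-- stated objective: alternative
-- what changed: Replaced the four staged any()-scans and the two-level dict .get fallback chain by a single accumulator pass over a flat keyword-to-priority map that keeps the minimal matching priority, followed by one index into a fully pre-resolved software-to-URL table.
import Mathlib
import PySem

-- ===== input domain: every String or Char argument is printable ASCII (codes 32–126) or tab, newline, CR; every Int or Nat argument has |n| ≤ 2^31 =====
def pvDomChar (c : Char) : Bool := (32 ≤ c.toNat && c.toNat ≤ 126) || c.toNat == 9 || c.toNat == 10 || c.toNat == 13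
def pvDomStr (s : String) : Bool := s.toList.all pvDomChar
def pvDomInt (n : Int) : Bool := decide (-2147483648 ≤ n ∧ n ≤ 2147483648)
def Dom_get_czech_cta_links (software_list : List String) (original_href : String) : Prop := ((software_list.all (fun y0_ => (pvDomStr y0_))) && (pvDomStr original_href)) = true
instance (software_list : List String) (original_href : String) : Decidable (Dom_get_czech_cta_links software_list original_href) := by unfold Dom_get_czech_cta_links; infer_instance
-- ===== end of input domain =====

-- B computes the minimal matching keyword priority in one accumulator pass and indexes a fully
-- resolved software→URL table, instead of A's staged if-elif any()-scans with per-branch .get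
-- fallbacks (alternative decomposition; same cost).


-- ===== PORT A =====
-- A-side helpers: the literal czech_links dict from A (the 'general' entry named
-- separately so that czech_links['general'] is this definition).
def generalLinksA : PySem.Dict String String :=
  PySem.Dict.ofList [("product", "/software/"), ("courses", "/kurzy/"),
    ("tutorials", "/navody/"), ("contact", "/kontakt/"), ("consultation", "/konzultace/")]

def czechLinksA : PySem.Dict String (PySem.Dict String String) :=
  PySem.Dict.ofList
    [ ("sketchup", PySem.Dict.ofList [("product", "/sketchup/"), ("courses", "/kurzy/sketchup-kurz/"),
        ("tutorials", "/navody/sketchup/"), ("licenses", "/sketchup-licence/")]),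
      ("d5-render", PySem.Dict.ofList [("product", "/d5-render/"), ("courses", "/kurzy/d5-render-kurz/"),
        ("tutorials", "/navody/d5-render/"), ("licenses", "/d5-render-licence/")]),
      ("archicad", PySem.Dict.ofList [("product", "/archicad/"), ("courses", "/kurzy/archicad-kurz/"),
        ("tutorials", "/navody/archicad/"), ("licenses", "/archicad-licence/")]),
      ("revit", PySem.Dict.ofList [("product", "/revit/"), ("courses", "/kurzy/revit-kurz/"),
        ("tutorials", "/navody/revit/"), ("licenses", "/revit-licence/")]),
      ("rhino", PySem.Dict.ofList [("product", "/rhino/"), ("courses", "/kurzy/rhino-kurz/"),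
        ("tutorials", "/navody/rhino/"), ("licenses", "/rhino-licence/")]),
      ("general", generalLinksA) ]

def get_czech_cta_links (software_list : List String) (original_href : String) : String :=
  let original_lower := PySem.Str.lower original_href
  let software_list := if software_list = [] then ["general"] else software_list
  -- software_list[0]: the list is nonempty after the guard, so headD is exact
  let primary_software := software_list.headD ""
  if ["licenc", "license", "predaj", "shop"].any (fun w => PySem.Str.isIn w original_lower) then
    (czechLinksA.getD primary_software generalLinksA).getD "licenses" "/software/"
  else if ["kurz", "skoleni", "training", "learn"].any (fun w => PySem.Str.isIn w original_lower) then
    (czechLinksA.getD primary_software generalLinksA).getD "courses" "/kurzy/"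
  else if ["navod", "tutorial", "guide", "help"].any (fun w => PySem.Str.isIn w original_lower) then
    (czechLinksA.getD primary_software generalLinksA).getD "tutorials" "/navody/"
  else if ["kontakt", "contact", "konzultac"].any (fun w => PySem.Str.isIn w original_lower) then
    (czechLinksA.getD primary_software generalLinksA).getD "consultation" "/konzultace/"
  else
    (czechLinksA.getD primary_software generalLinksA).getD "product" "/software/"

-- ===== PORT B =====
-- B-side helpers: the flat keyword→priority map and the fully resolved URL table of Source B.
def keywordPriority : List (String × Nat) :=
  [ ("licenc", 0), ("license", 0), ("predaj", 0), ("shop", 0),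
    ("kurz", 1), ("skoleni", 1), ("training", 1), ("learn", 1),
    ("navod", 2), ("tutorial", 2), ("guide", 2), ("help", 2),
    ("kontakt", 3), ("contact", 3), ("konzultac", 3) ]

def generalUrls : List String := ["/software/", "/kurzy/", "/navody/", "/konzultace/", "/software/"]

def urlTable : PySem.Dict String (List String) :=
  PySem.Dict.ofList
    [ ("sketchup", ["/sketchup-licence/", "/kurzy/sketchup-kurz/", "/navody/sketchup/", "/konzultace/", "/sketchup/"]),
      ("d5-render", ["/d5-render-licence/", "/kurzy/d5-render-kurz/", "/navody/d5-render/", "/konzultace/", "/d5-render/"]),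
      ("archicad", ["/archicad-licence/", "/kurzy/archicad-kurz/", "/navody/archicad/", "/konzultace/", "/archicad/"]),
      ("revit", ["/revit-licence/", "/kurzy/revit-kurz/", "/navody/revit/", "/konzultace/", "/revit/"]),
      ("rhino", ["/rhino-licence/", "/kurzy/rhino-kurz/", "/navody/rhino/", "/konzultace/", "/rhino/"]),
      ("general", generalUrls) ]

-- the for-loop of Source B: minimal priority among keywords occurring in `lower`, starting from 4
def minCat (items : List (String × Nat)) (lower : String) (cat : Nat) : Nat :=
  match items with
  | [] => cat
  | (kw, prio) :: rest =>
    minCat rest lower (if PySem.Str.isIn kw lower then min cat prio else cat)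

def get_czech_cta_links_alt (software_list : List String) (original_href : String) : String :=
  let lower := PySem.Str.lower original_href
  let cat := minCat keywordPriority lower 4
  let urls := urlTable.getD (match software_list with | [] => "general" | h :: _ => h) generalUrls
  -- urls[cat]: cat ≤ 4 and every table row has 5 entries, so getD is exact
  urls.getD cat ""

-- ===== PRECONDITION & SPEC =====
def Spec_get_czech_cta_links (software_list : List String) (original_href : String) (out : String) : Prop := out = get_czech_cta_links_alt software_list original_href
instance (software_list : List String) (original_href : String) (out : String) : Decidable (Spec_get_czech_cta_links software_list original_href out) := by unfold Spec_get_czech_cta_links; infer_instance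

-- ===== CLAIM (what is proved, stated in full; the proofs are below) =====
def Claim_equal_get_czech_cta_links : Prop := ∀ (software_list : List String) (original_href : String), Dom_get_czech_cta_links software_list original_href → Spec_get_czech_cta_links software_list original_href (get_czech_cta_links software_list original_href)

-- ===== LEMMAS AND PROOFS =====

-- minCat over an append is a composition of the two passes
theorem minCat_append (l1 l2 : List (String × Nat)) (lower : String) (acc : Nat) :
    minCat (l1 ++ l2) lower acc = minCat l2 lower (minCat l1 lower acc) := by
  induction l1 generalizing acc with
  | nil => rfl
  | cons hd tl ih => cases hd; simp [minCat, ih]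

-- a group of keywords sharing one priority contributes 'min acc i' iff any of them matches
theorem minCat_group (kws : List String) (i : Nat) (lower : String) (acc : Nat) :
    minCat (kws.map (fun k => (k, i))) lower acc
      = if kws.any (fun k => PySem.Str.isIn k lower) then min acc i else acc := by
  induction kws generalizing acc with
  | nil => simp [minCat]
  | cons k tl ih =>
    simp only [List.map_cons, minCat, List.any_cons, ih]
    by_cases h : PySem.Str.isIn k lower = true
    · simp only [h, Bool.true_or, if_true]
      split_ifs <;> omega
    · rw [Bool.not_eq_true] at h
      simp only [h, Bool.false_or]
      simp

-- the whole flat pass equals A's four-way cascade on the group booleans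
theorem minCat_cascade (lower : String) :
    minCat keywordPriority lower 4
      = if ["licenc", "license", "predaj", "shop"].any (fun w => PySem.Str.isIn w lower) then 0
        else if ["kurz", "skoleni", "training", "learn"].any (fun w => PySem.Str.isIn w lower) then 1
        else if ["navod", "tutorial", "guide", "help"].any (fun w => PySem.Str.isIn w lower) then 2
        else if ["kontakt", "contact", "konzultac"].any (fun w => PySem.Str.isIn w lower) then 3
        else 4 := by
  have h : keywordPriority
      = (["licenc", "license", "predaj", "shop"].map (fun k => (k, 0)))
        ++ ((["kurz", "skoleni", "training", "learn"].map (fun k => (k, 1)))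
        ++ ((["navod", "tutorial", "guide", "help"].map (fun k => (k, 2)))
        ++ (["kontakt", "contact", "konzultac"].map (fun k => (k, 3))))) := by rfl
  rw [h, minCat_append, minCat_append, minCat_append, minCat_group, minCat_group,
    minCat_group, minCat_group]
  split_ifs <;> rfl

-- when the primary software is not a table key, both lookups fall back to the general entry
theorem czech_default (p : String)
    (h : p ∉ ["sketchup", "d5-render", "archicad", "revit", "rhino", "general"]) :
    czechLinksA.getD p generalLinksA = generalLinksA := by
  apply PySem.Dict.getD_of_not_contains
  rw [PySem.Dict.contains_eq_decide_mem_keys]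
  have hk : czechLinksA.keys = ["sketchup", "d5-render", "archicad", "revit", "rhino", "general"] := by rfl
  rw [hk]; simpa using h

theorem url_default (p : String)
    (h : p ∉ ["sketchup", "d5-render", "archicad", "revit", "rhino", "general"]) :
    urlTable.getD p generalUrls = generalUrls := by
  apply PySem.Dict.getD_of_not_contains
  rw [PySem.Dict.contains_eq_decide_mem_keys]
  have hk : urlTable.keys = ["sketchup", "d5-render", "archicad", "revit", "rhino", "general"] := by rfl
  rw [hk]; simpa using h

-- for each category, A's two-level .get with fallback equals B's resolved-table lookup
theorem table_cat (p : String) (cname fb : String) (i : Nat)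
    (hcase : ∀ q ∈ (["sketchup", "d5-render", "archicad", "revit", "rhino", "general"] : List String),
      (czechLinksA.getD q generalLinksA).getD cname fb = (urlTable.getD q generalUrls).getD i "")
    (hdef : generalLinksA.getD cname fb = generalUrls.getD i "") :
    (czechLinksA.getD p generalLinksA).getD cname fb = (urlTable.getD p generalUrls).getD i "" := by
  by_cases h : p ∈ (["sketchup", "d5-render", "archicad", "revit", "rhino", "general"] : List String)
  · exact hcase p h
  · rw [czech_default p h, url_default p h, hdef]

-- ===== VERDICT (by name: the statement is the Claim_ definition above) =====
theorem get_czech_cta_links_spec : Claim_equal_get_czech_cta_links := by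
  intro software_list original_href _
  unfold Spec_get_czech_cta_links
  simp only [get_czech_cta_links, get_czech_cta_links_alt]
  rw [minCat_cascade]
  cases software_list <;>
    simp only [List.headD, reduceCtorEq, if_false] <;>
    split_ifs <;>
    first
    | exact table_cat _ "licenses" "/software/" 0 (by decide) (by decide)
    | exact table_cat _ "courses" "/kurzy/" 1 (by decide) (by decide)
    | exact table_cat _ "tutorials" "/navody/" 2 (by decide) (by decide)
    | exact table_cat _ "consultation" "/konzultace/" 3 (by decide) (by decide)
    | exact table_cat _ "product" "/software/" 4 (by decide) (by decide)
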